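-- pv_equiv track=rewrite | github.com/slbailey/retrovue | pkg/core/src/retrovue/presets/low_latency.py | apply_low_latency_audio
-- ===== SOURCE A (Python) =====
-- def apply_low_latency_audio(args: list[str], bitrate: str = "128k") -> list[str]:
--     """
--     Apply low latency audio settings to FFmpeg arguments.
--
--     Enforces:
--     - -ar 48000 (48kHz sample rate)
--     - -ac 2 (stereo channels)
--     - -b:a with the specified bitrate
--
--     Args:
--         args: List of existing FFmpeg arguments
--         bitrate: Audio bitrate (default: "128k")
--
--     Returns:
--         Updated list of FFmpeg arguments with low latency audio settings
--     """
--     # Create a copy to avoid modifying the original list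
--     result_args = args.copy()
--
--     # Low latency audio settings
--     low_latency_audio_flags = [
--         "-ar",
--         "48000",  # 48kHz sample rate
--         "-ac",
--         "2",  # Stereo channels
--         "-b:a",
--         bitrate,  # Audio bitrate
--     ]
--
--     # Insert the low latency flags after the input specification
--     # Find the last input file index to insert after it
--     input_index = -1
--     for i, arg in enumerate(result_args):
--         if not arg.startswith("-") and not arg.startswith("[") and not arg.startswith("]"):
--             # This is likely an input file
--             input_index = i
--
--     # Insert after the last input file, or at the beginning if no input found
--     insert_index = input_index + 1 if input_index >= 0 else 0
--     result_args[insert_index:insert_index] = low_latency_audio_flags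
--
--     return result_args
-- ===== SOURCE B (Python) =====
-- def apply_low_latency_audio(args: list[str], bitrate: str = "128k") -> list[str]:
--     flags = ["-ar", "48000", "-ac", "2", "-b:a", bitrate]
--
--     def splice(xs: list[str]) -> list[str]:
--         # peel off the flag-like tail ('-', '[' or ']' prefixed tokens), then
--         # append the audio flags right after the remaining (input) part
--         if xs and xs[-1].startswith(("-", "[", "]")):
--             return splice(xs[:-1]) + [xs[-1]]
--         return xs + flags
--
--     return splice(args)
-- ===== Notes on version B (the rewrite author's own statement) =====
-- stated objective: alternative
-- what changed: A scans forward keeping a last-matching-index accumulator and splices the flags in by slice assignment at a computed index; B has no index at all: it recursively peels the flag-like tail off the list and appends the flags at the recursion base, rebuilding the tail on the way out.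
import Mathlib
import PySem

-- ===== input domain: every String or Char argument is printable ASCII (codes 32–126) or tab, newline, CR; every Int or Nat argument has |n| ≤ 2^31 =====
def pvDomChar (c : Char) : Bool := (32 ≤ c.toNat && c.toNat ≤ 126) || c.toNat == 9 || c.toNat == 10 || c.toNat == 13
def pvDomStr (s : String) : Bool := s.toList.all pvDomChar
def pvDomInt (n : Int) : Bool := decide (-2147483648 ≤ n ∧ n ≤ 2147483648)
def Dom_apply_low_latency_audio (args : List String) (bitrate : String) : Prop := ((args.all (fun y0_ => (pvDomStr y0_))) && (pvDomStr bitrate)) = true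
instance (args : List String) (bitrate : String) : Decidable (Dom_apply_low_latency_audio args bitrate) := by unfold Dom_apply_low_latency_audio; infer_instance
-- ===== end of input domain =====

-- B replaces A's forward last-match index scan + slice insertion by a recursion that peels the
-- flag-like tail and appends the flags at the base (alternative decomposition; return value only,
-- neither implementation mutates args).


-- ===== PORT A =====
def pvIsInputA (arg : String) : Bool :=
  !PySem.Str.startswith arg "-" && !PySem.Str.startswith arg "[" && !PySem.Str.startswith arg "]"

def apply_low_latency_audio (args : List String) (bitrate : String) : List String :=
  let result_args := args
  let low_latency_audio_flags := ["-ar", "48000", "-ac", "2", "-b:a", bitrate]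
  let input_index : Int :=
    (PySem.List.enumerate result_args 0).foldl
      (fun acc p => if pvIsInputA p.2 then p.1 else acc) (-1)
  let insert_index : Int := if input_index ≥ 0 then input_index + 1 else 0
  -- result_args[insert_index:insert_index] = flags  (slice assignment)
  PySem.List.slice result_args none (some insert_index) ++ low_latency_audio_flags ++
    PySem.List.slice result_args (some insert_index) none

-- ===== PORT B =====
def pvFlagLike (arg : String) : Bool :=
  PySem.Str.startswith arg "-" || PySem.Str.startswith arg "[" || PySem.Str.startswith arg "]"

-- splice(xs): if xs and xs[-1] is flag-like, splice(xs[:-1]) + [xs[-1]], else xs + flags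
def pvSplice (flags : List String) (xs : List String) : List String :=
  match hx : xs.getLast? with
  | some x =>
    if pvFlagLike x then
      pvSplice flags (PySem.List.slice xs none (some (-1))) ++ [x]
    else xs ++ flags
  | none => xs ++ flags
termination_by xs.length
decreasing_by
  rw [PySem.List.slice_to_neg_one, List.length_dropLast]
  have hne : xs ≠ [] := by intro h; subst h; simp at hx
  have h0 : xs.length ≠ 0 := fun h0 => hne (List.eq_nil_of_length_eq_zero h0)
  omega

def apply_low_latency_audio_alt (args : List String) (bitrate : String) : List String :=
  pvSplice ["-ar", "48000", "-ac", "2", "-b:a", bitrate] args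

-- ===== PRECONDITION & SPEC =====
def Spec_apply_low_latency_audio (args : List String) (bitrate : String) (out : List String) : Prop := out = apply_low_latency_audio_alt args bitrate
instance (args : List String) (bitrate : String) (out : List String) : Decidable (Spec_apply_low_latency_audio args bitrate out) := by unfold Spec_apply_low_latency_audio; infer_instance

-- ===== CLAIM (what is proved, stated in full; the proofs are below) =====
def Claim_equal_apply_low_latency_audio : Prop := ∀ (args : List String) (bitrate : String), Dom_apply_low_latency_audio args bitrate → Spec_apply_low_latency_audio args bitrate (apply_low_latency_audio args bitrate)

-- ===== LEMMAS AND PROOFS =====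

-- A's last-input-index accumulator, as a standalone function
def pvLastIdx (l : List String) : Int :=
  (PySem.List.enumerate l 0).foldl (fun acc p => if pvIsInputA p.2 then p.1 else acc) (-1)

lemma pvIsInputA_eq_not_flagLike (s : String) : pvIsInputA s = !pvFlagLike s := by
  simp [pvIsInputA, pvFlagLike]

lemma pvLastIdx_append (l : List String) (x : String) :
    pvLastIdx (l ++ [x]) = if pvIsInputA x then (l.length : Int) else pvLastIdx l := by
  simp [pvLastIdx, PySem.List.enumerate_append, List.foldl_append]

lemma pvLastIdx_bounds (l : List String) : -1 ≤ pvLastIdx l ∧ pvLastIdx l < l.length := by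
  induction l using List.reverseRecOn with
  | nil => simp [pvLastIdx, PySem.List.enumerate]
  | append_singleton l x ih =>
    rw [pvLastIdx_append]
    rcases ih with ⟨h1, h2⟩
    split <;> simp <;> omega

lemma pvSplice_dropLast (flags : List String) (l : List String) (x : String) :
    pvSplice flags (l ++ [x]) =
      if pvFlagLike x then pvSplice flags l ++ [x] else (l ++ [x]) ++ flags := by
  rw [pvSplice]
  split
  · rename_i y hy
    rw [List.getLast?_concat] at hy
    obtain rfl : x = y := by injection hy
    simp [PySem.List.slice_to_neg_one]
  · rename_i hy
    rw [List.getLast?_concat] at hy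
    exact absurd hy (by simp)

lemma pvMain (l : List String) (flags : List String) :
    (PySem.List.slice l none (some (if pvLastIdx l ≥ 0 then pvLastIdx l + 1 else 0)) ++ flags ++
      PySem.List.slice l (some (if pvLastIdx l ≥ 0 then pvLastIdx l + 1 else 0)) none)
      = pvSplice flags l := by
  induction l using List.reverseRecOn with
  | nil =>
    simp [pvLastIdx, PySem.List.enumerate, pvSplice, PySem.List.slice]
  | append_singleton l x ih =>
    rw [pvSplice_dropLast, pvLastIdx_append]
    cases hA : pvIsInputA x with
    | true =>
      have hF : pvFlagLike x = false := by
        have := pvIsInputA_eq_not_flagLike x; rw [hA] at this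
        cases h : pvFlagLike x <;> simp [h] at this ⊢
      simp only [hF, if_true, Bool.false_eq_true, if_false]
      have hge : ((l.length : Int)) ≥ 0 := by positivity
      rw [if_pos hge]
      have h1 : ((l.length : Int) + 1) = ((l.length + 1 : Nat) : Int) := by push_cast; ring
      rw [h1, PySem.List.slice_to_natCast, PySem.List.slice_from_natCast]
      have hlen : (l ++ [x]).length = l.length + 1 := by simp
      simp [List.take_of_length_le, List.drop_of_length_le, hlen]
    | false =>
      have hF : pvFlagLike x = true := by
        have := pvIsInputA_eq_not_flagLike x; rw [hA] at this
        cases h : pvFlagLike x <;> simp [h] at this ⊢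
      simp only [hF, if_true, Bool.false_eq_true, if_false]
      rw [← ih]
      rcases pvLastIdx_bounds l with ⟨hlo, hhi⟩
      set i : Int := if pvLastIdx l ≥ 0 then pvLastIdx l + 1 else 0 with hi
      have hi0 : 0 ≤ i ∧ i ≤ (l.length : Int) := by
        constructor <;> (rw [hi]; split <;> omega)
      obtain ⟨k, hk, hkle⟩ : ∃ k : Nat, i = (k : Int) ∧ k ≤ l.length := by
        refine ⟨i.toNat, ?_, ?_⟩ <;> omega
      rw [hk]
      simp only [PySem.List.slice_to_natCast, PySem.List.slice_from_natCast]
      rw [List.take_append_of_le_length hkle, List.drop_append_of_le_length hkle]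
      simp

-- ===== VERDICT (by name: the statement is the Claim_ definition above) =====
theorem apply_low_latency_audio_spec : Claim_equal_apply_low_latency_audio := by
  intro args bitrate _
  show _ = _
  simp only [apply_low_latency_audio, apply_low_latency_audio_alt]
  exact pvMain args _
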